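-- pv_equiv track=rewrite | github.com/bigscience-workshop/biomedical | bigbio/hub/hub_repos/monero/monero.py | _assign_offsets
-- ===== SOURCE A (Python) =====
-- from typing import Any, List, Tuple, Dict
--
-- def _assign_offsets(tokens: List[str]) -> List[Tuple[int, int]]:
--     """ Compute token offsets from list of tokens """
--
--     offsets = []
--     start = 0
--     for t in tokens:
--         s = start
--         e = s + len(t)
--         offsets.append((s, e))
--         start = e + 1  # Add one to include space.
--
--     return offsets
-- ===== SOURCE B (Python) =====
-- from typing import Any, List, Tuple, Dict
--
-- def _assign_offsets(tokens: List[str]) -> List[Tuple[int, int]]: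
--     """ Compute token offsets from list of tokens """
--     # Build a prefix-sum table of start positions, then map over (start, token) pairs.
--     starts = [0]
--     s = 0
--     for t in tokens[:-1]:
--         s += len(t) + 1  # Add one to include space.
--         starts.append(s)
--     return [(s, s + len(t)) for s, t in zip(starts, tokens)]
-- ===== Notes on version B (the rewrite author's own statement) =====
-- stated objective: alternative
-- what changed: Replaces the single loop that accumulates (start,end) pairs in-flight with a two-pass decomposition: first build a prefix-sum table of token start positions, then map (start, token) pairs to offset pairs.
import Mathlib
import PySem

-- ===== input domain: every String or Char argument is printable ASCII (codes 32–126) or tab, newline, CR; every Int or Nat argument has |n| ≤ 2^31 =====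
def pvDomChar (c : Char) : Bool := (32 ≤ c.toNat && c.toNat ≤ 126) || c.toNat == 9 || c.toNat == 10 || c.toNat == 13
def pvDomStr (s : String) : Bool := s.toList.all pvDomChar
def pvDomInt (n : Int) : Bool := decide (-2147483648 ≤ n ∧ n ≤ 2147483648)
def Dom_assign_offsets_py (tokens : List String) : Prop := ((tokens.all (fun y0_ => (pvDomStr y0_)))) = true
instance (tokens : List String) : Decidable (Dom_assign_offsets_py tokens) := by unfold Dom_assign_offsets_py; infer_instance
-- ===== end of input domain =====

-- B replaces A's single accumulating loop by a prefix-sum table of start positions plus a mapping pass (alternative decomposition, same O(n) cost).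

-- ===== PORT A =====
-- A: one loop, state = (offsets list, start); appends (s, s+len t) and sets start := e+1.
def assign_offsets_py (tokens : List String) : List (Int × Int) :=
  (tokens.foldl
    (fun (st : List (Int × Int) × Int) t =>
      let s := st.2
      let e := s + PySem.Str.len t
      (st.1 ++ [(s, e)], e + 1))
    ([], 0)).1

-- ===== PORT B =====
-- B: first pass builds the prefix-sum table `starts` over tokens[:-1] (List.dropLast = tokens[:-1]),
-- second pass maps zip(starts, tokens) to (s, s+len t).
def assign_offsets_py_alt (tokens : List String) : List (Int × Int) :=
  let st := tokens.dropLast.foldl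
    (fun (acc : List Int × Int) t =>
      let s := acc.2 + PySem.Str.len t + 1
      (acc.1 ++ [s], s))
    ([0], 0)
  (st.1.zip tokens).map (fun p => (p.1, p.1 + PySem.Str.len p.2))

-- ===== PRECONDITION & SPEC =====
def Spec_assign_offsets_py (tokens : List String) (out : List (Int × Int)) : Prop := out = assign_offsets_py_alt tokens
instance (tokens : List String) (out : List (Int × Int)) : Decidable (Spec_assign_offsets_py tokens out) := by unfold Spec_assign_offsets_py; infer_instance

-- ===== CLAIM (what is proved, stated in full; the proofs are below) =====
def Claim_equal_assign_offsets_py : Prop := ∀ (tokens : List String), Dom_assign_offsets_py tokens → Spec_assign_offsets_py tokens (assign_offsets_py tokens)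

-- ===== LEMMAS AND PROOFS =====

-- start positions that A's loop produces, beginning at s
def pvBStarts : List String → Int → List Int
  | [], _ => []
  | t :: ts, s => s :: pvBStarts ts (s + PySem.Str.len t + 1)

-- the entries B's first loop appends after the initial 0, beginning from running sum s
def pvTStarts : List String → Int → List Int
  | [], _ => []
  | t :: ts, s => (s + PySem.Str.len t + 1) :: pvTStarts ts (s + PySem.Str.len t + 1)

theorem pvA_fold (ts : List String) : ∀ (acc : List (Int × Int)) (s : Int),
    (ts.foldl
      (fun (st : List (Int × Int) × Int) t =>
        let s := st.2
        let e := s + PySem.Str.len t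
        (st.1 ++ [(s, e)], e + 1))
      (acc, s)).1
    = acc ++ ((pvBStarts ts s).zip ts).map (fun p => (p.1, p.1 + PySem.Str.len p.2)) := by
  induction ts with
  | nil => simp [pvBStarts]
  | cons t ts ih =>
      intro acc s
      simp only [List.foldl, pvBStarts, List.zip_cons_cons, List.map_cons]
      rw [ih]
      simp

theorem pvB_fold (ts : List String) : ∀ (acc : List Int) (s : Int),
    (ts.foldl
      (fun (acc : List Int × Int) t =>
        let s := acc.2 + PySem.Str.len t + 1
        (acc.1 ++ [s], s))
      (acc, s)).1
    = acc ++ pvTStarts ts s := by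
  induction ts with
  | nil => simp [pvTStarts]
  | cons t ts ih =>
      intro acc s
      simp only [List.foldl, pvTStarts]
      rw [ih]
      simp

theorem pvZip_eq (ts : List String) : ∀ (s : Int),
    (((s :: pvTStarts ts.dropLast s).zip ts).map (fun p => (p.1, p.1 + PySem.Str.len p.2)))
    = (((pvBStarts ts s).zip ts).map (fun p => (p.1, p.1 + PySem.Str.len p.2))) := by
  induction ts with
  | nil => intro s; simp [pvBStarts]
  | cons t ts ih =>
      intro s
      cases ts with
      | nil => simp [pvBStarts, pvTStarts]
      | cons u us =>
          have h := ih (s + PySem.Str.len t + 1)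
          simp only [pvBStarts, List.zip_cons_cons, List.map_cons, List.cons.injEq,
            true_and] at h
          simp only [List.dropLast_cons₂, pvTStarts, pvBStarts,
            List.zip_cons_cons, List.map_cons, h]

-- ===== VERDICT (by name: the statement is the Claim_ definition above) =====
theorem assign_offsets_py_spec : Claim_equal_assign_offsets_py := by
  intro tokens _
  show assign_offsets_py tokens = assign_offsets_py_alt tokens
  unfold assign_offsets_py assign_offsets_py_alt
  simp only [pvA_fold, pvB_fold, List.nil_append, List.singleton_append]
  exact (pvZip_eq tokens 0).symm
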